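-- pv_equiv track=rewrite | github.com/AnTetsuo/advent2023 | advent_02_b_2023.py | dice_min_config
-- ===== SOURCE A (Python) =====
-- def dice_min_config(pulls):
--     config = {}
--     for pull in pulls:
--         for color, quantity in pull.items():
--             if color not in config:
--                 config[color] = int(quantity)
--             else:
--                 config[color] = (
--                     quantity if quantity > config[color] else config[color]
--                   )
--     return config.values()
-- ===== SOURCE B (Python) =====
-- def dice_min_config(pulls):
--     groups = {}
--     for pull in pulls:
--         for color, quantity in pull.items():
--             groups.setdefault(color, []).append(quantity)
--     return [max(qs) for qs in groups.values()]
-- ===== Notes on version B (the rewrite author's own statement) =====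
-- stated objective: alternative
-- what changed: B first groups all quantities by color into ordered per-color lists (one dict-building pass), then reduces each list with the builtin max in a separate pass, instead of A's single pass maintaining a running maximum per color.
import Mathlib
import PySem

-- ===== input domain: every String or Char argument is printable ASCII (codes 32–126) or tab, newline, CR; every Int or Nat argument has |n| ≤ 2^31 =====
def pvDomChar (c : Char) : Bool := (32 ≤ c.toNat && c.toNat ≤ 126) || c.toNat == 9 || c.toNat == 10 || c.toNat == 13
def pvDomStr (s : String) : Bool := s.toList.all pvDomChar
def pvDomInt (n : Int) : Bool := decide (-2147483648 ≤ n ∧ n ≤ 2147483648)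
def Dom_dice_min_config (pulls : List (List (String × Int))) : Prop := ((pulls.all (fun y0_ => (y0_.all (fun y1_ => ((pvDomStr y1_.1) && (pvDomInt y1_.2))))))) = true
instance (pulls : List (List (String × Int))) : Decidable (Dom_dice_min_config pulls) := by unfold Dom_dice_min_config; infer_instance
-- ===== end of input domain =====

-- B replaces A's single running-max pass by a group-by-color pass followed by a separate
-- per-color reduction with max (objective: alternative decomposition, same asymptotic cost).

-- ===== PORT A =====
-- Each inner list models a Python dict; `pull.items()` is (PySem.Dict.ofList pull).items.
-- `int(quantity)` on an int is the identity.
def dice_min_config (pulls : List (List (String × Int))) : List Int :=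
  (pulls.foldl (fun config pull =>
      ((PySem.Dict.ofList pull).items).foldl (fun config p =>
        if config.contains p.1 = false then
          config.insert p.1 p.2
        else
          config.insert p.1 (if p.2 > config.getD p.1 0 then p.2 else config.getD p.1 0))
        config)
    PySem.Dict.empty).values

-- ===== PORT B =====
-- `max(qs)` is PySem.List.max?; it is applied only to the per-color groups, which are
-- all nonempty, so the none branch (Python: ValueError on an empty sequence) is unreachable.
def pvMax (qs : List Int) : Int :=
  match PySem.List.max? qs (fun y => y) with
  | some m => m
  | none => 0

-- groups.setdefault(color, []).append(quantity)  =  modify color [] (· ++ [quantity])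
def dice_min_config_alt (pulls : List (List (String × Int))) : List Int :=
  let groups := pulls.foldl (fun g pull =>
      ((PySem.Dict.ofList pull).items).foldl (fun g p => g.modify p.1 [] (· ++ [p.2])) g)
    PySem.Dict.empty
  groups.values.map pvMax

-- ===== PRECONDITION & SPEC =====
def Spec_dice_min_config (pulls : List (List (String × Int))) (out : List Int) : Prop := out = dice_min_config_alt pulls
instance (pulls : List (List (String × Int))) (out : List Int) : Decidable (Spec_dice_min_config pulls out) := by unfold Spec_dice_min_config; infer_instance

-- ===== CLAIM (what is proved, stated in full; the proofs are below) =====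
def Claim_equal_dice_min_config : Prop := ∀ (pulls : List (List (String × Int))), Dom_dice_min_config pulls → Spec_dice_min_config pulls (dice_min_config pulls)

-- ===== LEMMAS AND PROOFS =====

-- the single-pair step functions of the two loops
def pvStepA (config : PySem.Dict String Int) (p : String × Int) : PySem.Dict String Int :=
  if config.contains p.1 = false then
    config.insert p.1 p.2
  else
    config.insert p.1 (if p.2 > config.getD p.1 0 then p.2 else config.getD p.1 0)

def pvStepB (g : PySem.Dict String (List Int)) (p : String × Int) : PySem.Dict String (List Int) :=
  g.modify p.1 [] (· ++ [p.2])

def pvMapMax (l : List (String × List Int)) : List (String × Int) :=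
  l.map (fun p => (p.1, pvMax p.2))

theorem pvMax_cons (q0 : Int) (rest : List Int) :
    pvMax (q0 :: rest) = rest.foldl max q0 := by
  simp [pvMax, PySem.List.max?_id_cons]

theorem pvMax_append (qs : List Int) (h : qs ≠ []) (q : Int) :
    pvMax (qs ++ [q]) = if q > pvMax qs then q else pvMax qs := by
  cases qs with
  | nil => exact absurd rfl h
  | cons q0 rest =>
      rw [List.cons_append, pvMax_cons, pvMax_cons, List.foldl_append]
      simp only [List.foldl]
      rcases lt_or_ge (rest.foldl max q0) q with h' | h'
      · rw [max_eq_right h'.le, if_pos h']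
      · rw [max_eq_left h', if_neg (not_lt.mpr h')]

theorem pvGet?_map (l : List (String × List Int)) (c : String) :
    (PySem.Dict.mk (pvMapMax l)).get? c = ((PySem.Dict.mk l).get? c).map pvMax := by
  induction l with
  | nil => rfl
  | cons p rest ih =>
      obtain ⟨k, v⟩ := p
      simp only [pvMapMax] at ih ⊢
      simp only [List.map_cons, PySem.Dict.get?_mk_cons]
      by_cases hc : (k == c) = true
      · simp [hc]
      · simp [hc, ih]

-- the key invariant, pushed through one pair
theorem pvStep_rel (dA : PySem.Dict String Int) (dB : PySem.Dict String (List Int))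
    (hItems : dA.items = pvMapMax dB.items)
    (hNE : ∀ p ∈ dB.items, p.2 ≠ ([] : List Int)) (p : String × Int) :
    (pvStepA dA p).items = pvMapMax (pvStepB dB p).items ∧
      ∀ q ∈ (pvStepB dB p).items, q.2 ≠ ([] : List Int) := by
  have hget : dA.get? p.1 = (dB.get? p.1).map pvMax := by
    have h1 : dA = PySem.Dict.mk (pvMapMax dB.items) := by
      cases dA; cases dB; simpa using hItems
    rw [h1, pvGet?_map]
  have hcont : dA.contains p.1 = dB.contains p.1 := by
    rw [PySem.Dict.contains_eq_isSome_get?, PySem.Dict.contains_eq_isSome_get?, hget]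
    cases dB.get? p.1 <;> rfl
  by_cases hc : dB.contains p.1
  · -- key already present
    obtain ⟨qs0, hqs0⟩ : ∃ qs0, dB.get? p.1 = some qs0 := by
      rcases hh : dB.get? p.1 with _ | qs0
      · rw [PySem.Dict.contains_eq_isSome_get?, hh] at hc; simp at hc
      · exact ⟨qs0, rfl⟩
    have hqsne : qs0 ≠ [] := hNE _ (PySem.Dict.mem_items_of_get?_eq_some _ hqs0)
    have hgetDB : dB.getD p.1 [] = qs0 := PySem.Dict.getD_of_get?_eq_some _ _ hqs0
    have hgetDA : dA.getD p.1 0 = pvMax qs0 := by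
      apply PySem.Dict.getD_of_get?_eq_some _ _; rw [hget, hqs0]; rfl
    have hcA : dA.contains p.1 = true := by rw [hcont]; exact hc
    constructor
    · simp only [pvStepA, pvStepB, hcA, PySem.Dict.modify]
      rw [if_neg (by simp), PySem.Dict.items_insert_of_contains _ _ hcA,
          PySem.Dict.items_insert_of_contains _ _ hc]
      simp only [pvMapMax, List.map_map, hItems, pvMapMax]
      apply List.map_congr_left
      intro q _
      by_cases hq : q.1 == p.1
      · simp only [Function.comp, hq, if_pos, hgetDB, hgetDA]
        rw [pvMax_append qs0 hqsne]
      · simp [Function.comp, hq]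
    · intro q hq
      simp only [pvStepB, PySem.Dict.modify, PySem.Dict.items_insert_of_contains _ _ hc] at hq
      rcases List.mem_map.mp hq with ⟨r, hr, hrq⟩
      by_cases hr1 : r.1 == p.1
      · rw [if_pos hr1] at hrq; rw [← hrq]; simp
      · rw [if_neg hr1] at hrq; rw [← hrq]; exact hNE _ hr
  · -- fresh key: both append at the end
    have hcB : dB.contains p.1 = false := by simpa using hc
    have hcA : dA.contains p.1 = false := by rw [hcont]; exact hcB
    have hgetDB : dB.getD p.1 [] = [] := PySem.Dict.getD_of_not_contains _ _ hcB
    constructor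
    · simp only [pvStepA, pvStepB, hcA, PySem.Dict.modify]
      rw [if_pos trivial, PySem.Dict.items_insert_of_not_contains _ _ hcA,
          PySem.Dict.items_insert_of_not_contains _ _ hcB]
      simp [pvMapMax, hItems, hgetDB, pvMax_cons]
    · intro q hq
      simp only [pvStepB, PySem.Dict.modify,
        PySem.Dict.items_insert_of_not_contains _ _ hcB, hgetDB] at hq
      rcases List.mem_append.mp hq with h | h
      · exact hNE _ h
      · simp at h; simp [h]

theorem pvFold_rel (l : List (String × Int)) :
    ∀ (dA : PySem.Dict String Int) (dB : PySem.Dict String (List Int)),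
      dA.items = pvMapMax dB.items →
      (∀ p ∈ dB.items, p.2 ≠ ([] : List Int)) →
      (l.foldl pvStepA dA).items = pvMapMax (l.foldl pvStepB dB).items ∧
        ∀ q ∈ (l.foldl pvStepB dB).items, q.2 ≠ ([] : List Int) := by
  induction l with
  | nil => intro dA dB h1 h2; exact ⟨h1, h2⟩
  | cons p rest ih =>
      intro dA dB h1 h2
      obtain ⟨h1', h2'⟩ := pvStep_rel dA dB h1 h2 p
      exact ih _ _ h1' h2'

theorem pvOuter_rel (pulls : List (List (String × Int))) :
    ∀ (dA : PySem.Dict String Int) (dB : PySem.Dict String (List Int)),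
      dA.items = pvMapMax dB.items →
      (∀ p ∈ dB.items, p.2 ≠ ([] : List Int)) →
      (pulls.foldl (fun c pull => ((PySem.Dict.ofList pull).items).foldl pvStepA c) dA).items
        = pvMapMax
          (pulls.foldl (fun g pull => ((PySem.Dict.ofList pull).items).foldl pvStepB g) dB).items ∧
        ∀ q ∈ (pulls.foldl (fun g pull => ((PySem.Dict.ofList pull).items).foldl pvStepB g) dB).items,
          q.2 ≠ ([] : List Int) := by
  induction pulls with
  | nil => intro dA dB h1 h2; exact ⟨h1, h2⟩
  | cons pull rest ih =>
      intro dA dB h1 h2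
      obtain ⟨h1', h2'⟩ := pvFold_rel ((PySem.Dict.ofList pull).items) dA dB h1 h2
      exact ih _ _ h1' h2'

-- ===== VERDICT (by name: the statement is the Claim_ definition above) =====
theorem dice_min_config_spec : Claim_equal_dice_min_config := by
  intro pulls _
  unfold Spec_dice_min_config dice_min_config dice_min_config_alt
  have hA : (fun (config : PySem.Dict String Int) (p : String × Int) =>
      if config.contains p.1 = false then config.insert p.1 p.2
      else config.insert p.1 (if p.2 > config.getD p.1 0 then p.2 else config.getD p.1 0))
      = pvStepA := rfl
  have hB : (fun (g : PySem.Dict String (List Int)) (p : String × Int) =>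
      g.modify p.1 [] (· ++ [p.2])) = pvStepB := rfl
  rw [hA, hB]
  obtain ⟨h1, _⟩ := pvOuter_rel pulls PySem.Dict.empty PySem.Dict.empty rfl (by intro p h; simp [PySem.Dict.empty] at h)
  simp only [PySem.Dict.values, h1, pvMapMax, List.map_map]
  rfl
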